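-- pv_equiv track=rewrite | github.com/rimrim990/Algotirhm | 백준/코딩테스트 유형/13144_opt.py | solve
-- ===== SOURCE A (Python) =====
-- def solve(n, arr, nums):
--   left = 0; right = 0
--   total = 0
--
--   while left < n:
--     # [left, right)
--     while right < n:
--       if nums[arr[right]]:
--         break
--
--       nums[arr[right]] = True
--       right += 1
--       total += right - left
--
--     nums[arr[left]] = False
--     left += 1
--
--   return total
-- ===== SOURCE B (Python) =====
-- def solve(n, arr, nums):
--     # Count subarrays of arr[:n] whose elements are pairwise distinct and none
--     # of which is flagged in nums (flagged values are banned and never belong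
--     # to a counted window).  Single forward pass: 'last' records, parallel to
--     # nums, the most recent position of each value; the window start jumps
--     # past a repeat or past a banned position.
--     last = [-1] * len(nums)
--     left = 0
--     total = 0
--     for r in range(n):
--         v = arr[r]
--         if nums[v]:
--             left = r + 1
--         else:
--             if last[v] >= left:
--                 left = last[v] + 1
--             last[v] = r
--         total += r - left + 1
--     return total
-- ===== Notes on version B (the rewrite author's own statement) =====
-- stated objective: alternative
-- what changed: Replaced A's nested outer-left/inner-grow two-pointer over a mutable occupancy-flag array by a single forward pass over the right end that keeps a last-occurrence array parallel to nums (values flagged in nums are treated as banned and never enter a counted window); B does not mutate nums, only the return value is matched.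
import Mathlib
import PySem

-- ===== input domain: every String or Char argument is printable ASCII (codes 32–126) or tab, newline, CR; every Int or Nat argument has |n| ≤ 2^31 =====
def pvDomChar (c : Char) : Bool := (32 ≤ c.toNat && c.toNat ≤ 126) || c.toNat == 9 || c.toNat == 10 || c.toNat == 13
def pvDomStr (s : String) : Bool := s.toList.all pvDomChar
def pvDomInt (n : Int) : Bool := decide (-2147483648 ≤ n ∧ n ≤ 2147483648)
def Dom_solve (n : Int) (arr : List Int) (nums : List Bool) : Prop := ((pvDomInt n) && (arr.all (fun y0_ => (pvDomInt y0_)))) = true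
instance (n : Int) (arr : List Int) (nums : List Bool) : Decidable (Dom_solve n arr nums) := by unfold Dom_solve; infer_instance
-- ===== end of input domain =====

-- B replaces A's nested two-pointer/occupancy-flag loops by one forward pass over the
-- right end with a last-occurrence array parallel to nums; A mutates nums in place
-- (B does not) — the equivalence proved here is about the RETURN value only.

-- ===== PORT A =====
-- inner 'while right < n' loop of A; returns (right, total, nums)
def solveInnerA (n : Int) (arr : List Int) (left right total : Int) (nums : List Bool) :
    Int × Int × List Bool :=
  if _h : right < n then
    let v := PySem.List.pyGetD arr right 0
    if PySem.List.pyGetD nums v false then (right, total, nums)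
    else
      solveInnerA n arr left (right + 1) (total + (right + 1 - left))
        (PySem.List.pySetD nums v true)
  else (right, total, nums)
termination_by (n - right).toNat
decreasing_by omega

-- outer 'while left < n' loop of A
def solveOuterA (n : Int) (arr : List Int) (left right total : Int) (nums : List Bool) : Int :=
  if _h : left < n then
    let s := solveInnerA n arr left right total nums
    solveOuterA n arr (left + 1) s.1 s.2.1
      (PySem.List.pySetD s.2.2 (PySem.List.pyGetD arr left 0) false)
  else total
termination_by (n - left).toNat
decreasing_by omega

def solve (n : Int) (arr : List Int) (nums : List Bool) : Int :=
  solveOuterA n arr 0 0 0 nums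

-- ===== PORT B =====
-- one forward pass; state is (last-occurrence array, window start, running total)
def solveStepB (arr : List Int) (nums : List Bool)
    (st : List Int × Int × Int) (r : Int) :
    List Int × Int × Int :=
  let last := st.1
  let left := st.2.1
  let total := st.2.2
  let v := PySem.List.pyGetD arr r 0
  if PySem.List.pyGetD nums v false then
    let left' := r + 1
    (last, left', total + (r - left' + 1))
  else
    let left' := if PySem.List.pyGetD last v (-1) ≥ left
      then PySem.List.pyGetD last v (-1) + 1 else left
    (PySem.List.pySetD last v r, left', total + (r - left' + 1))

def solve_alt (n : Int) (arr : List Int) (nums : List Bool) : Int :=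
  let st := (PySem.List.pyRange 0 n 1).foldl (solveStepB arr nums)
    (List.replicate nums.length (-1 : Int), 0, 0)
  st.2.2

-- ===== PRECONDITION & SPEC =====
-- Pre_ excludes exactly the inputs on which A raises: an out-of-range read arr[left]
-- (n larger than len(arr)) or a flag index arr[i], i < n, outside Python's wraparound
-- range of nums.
def Pre_solve (n : Int) (arr : List Int) (nums : List Bool) : Prop :=
  n ≤ 0 ∨ (n ≤ (arr.length : Int) ∧
    ∀ v ∈ arr.take n.toNat, -(nums.length : Int) ≤ v ∧ v < (nums.length : Int))
instance (n : Int) (arr : List Int) (nums : List Bool) : Decidable (Pre_solve n arr nums) := by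
  unfold Pre_solve; infer_instance

def pvWitness_solve : Int × List Int × List Bool := (3, [0, 1, 0], [false, false])

def Spec_solve (n : Int) (arr : List Int) (nums : List Bool) (out : Int) : Prop := out = solve_alt n arr nums
instance (n : Int) (arr : List Int) (nums : List Bool) (out : Int) : Decidable (Spec_solve n arr nums out) := by unfold Spec_solve; infer_instance

-- ===== CLAIM (what is proved, stated in full; the proofs are below) =====
def Claim_equal_solve : Prop := ∀ (n : Int) (arr : List Int) (nums : List Bool), Dom_solve n arr nums → Pre_solve n arr nums → Spec_solve n arr nums (solve n arr nums)

-- ===== LEMMAS AND PROOFS =====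

def lastOcc (c : Nat → Nat) (r k : Nat) : Option Nat :=
  (List.range r).reverse.find? (fun j => c j == k)

def Lf (c : Nat → Nat) (p : Nat → Bool) : Nat → Nat
  | 0 => 0
  | r + 1 => if p (c r) then r + 1 else max (Lf c p r) ((lastOcc c r (c r)).elim 0 (· + 1))

def Tot (c : Nat → Nat) (p : Nat → Bool) (r : Nat) : Int :=
  ∑ j ∈ Finset.range r, ((j : Int) + 1 - (Lf c p (j + 1) : Int))

def Alive (c : Nat → Nat) (p : Nat → Bool) (t r k : Nat) : Prop :=
  (∃ j, j < r ∧ c j = k ∧ ∀ i, i < t → c i = k → i < Lf c p (j + 1)) ∨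
  (p k = true ∧ ∀ i, i < t → c i ≠ k)

theorem lastOcc_succ (c : Nat → Nat) (r k : Nat) :
    lastOcc c (r + 1) k = if c r = k then some r else lastOcc c r k := by
  unfold lastOcc
  rw [List.range_succ, List.reverse_append]
  by_cases h : c r = k <;> simp [h]

theorem lastOcc_some (c : Nat → Nat) {r k j : Nat} (h : lastOcc c r k = some j) :
    j < r ∧ c j = k := by
  induction r with
  | zero => simp [lastOcc] at h
  | succ r ih =>
    rw [lastOcc_succ] at h
    split_ifs at h with hc
    · cases h; exact ⟨Nat.lt_succ_self _, hc⟩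
    · exact ⟨Nat.lt_succ_of_lt (ih h).1, (ih h).2⟩

theorem lastOcc_ge (c : Nat → Nat) {r k i : Nat} (hir : i < r) (hik : c i = k) :
    ∃ j, lastOcc c r k = some j ∧ i ≤ j := by
  induction r with
  | zero => omega
  | succ r ih =>
    rw [lastOcc_succ]
    by_cases hc : c r = k
    · exact ⟨r, by simp [hc], by omega⟩
    · have hir' : i < r := by
        rcases Nat.lt_succ_iff_lt_or_eq.mp hir with h | h
        · exact h
        · exact absurd (h ▸ hik) hc
      rcases ih hir' with ⟨j, hj, hij⟩
      exact ⟨j, by simp [hc, hj], hij⟩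

theorem Lf_le (c : Nat → Nat) (p : Nat → Bool) (r : Nat) : Lf c p r ≤ r := by
  induction r with
  | zero => simp [Lf]
  | succ r ih =>
    rw [Lf]
    split_ifs
    · exact le_rfl
    · refine max_le (by omega) ?_
      cases h : lastOcc c r (c r) with
      | none => simp
      | some j => have := (lastOcc_some c h).1; simp; omega

theorem Lf_mono_succ (c : Nat → Nat) (p : Nat → Bool) (r : Nat) :
    Lf c p r ≤ Lf c p (r + 1) := by
  rw [show Lf c p (r + 1) = if p (c r) then r + 1 else max (Lf c p r) ((lastOcc c r (c r)).elim 0 (· + 1)) from rfl]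
  split_ifs
  · have := Lf_le c p r; omega
  · exact le_max_left _ _

theorem Lf_nonpreset_le (c : Nat → Nat) (p : Nat → Bool) {r : Nat} (h : p (c r) = false) :
    Lf c p (r + 1) ≤ r := by
  rw [Lf, h]
  simp only [Bool.false_eq_true, if_false]
  refine max_le (Lf_le c p r) ?_
  cases hl : lastOcc c r (c r) with
  | none => simp
  | some j => have := (lastOcc_some c hl).1; simp; omega

theorem Lf_preset (c : Nat → Nat) (p : Nat → Bool) {r : Nat} (h : p (c r) = true) :
    Lf c p (r + 1) = r + 1 := by
  rw [Lf, h]; simp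

theorem occ_lt_Lf (c : Nat → Nat) (p : Nat → Bool) {i r : Nat}
    (hik : c i = c r) (hir : i < r) : i < Lf c p (r + 1) := by
  rw [Lf]
  split_ifs
  · omega
  · rcases lastOcc_ge c hir hik with ⟨j, hj, hij⟩
    have : (lastOcc c r (c r)).elim 0 (· + 1) = j + 1 := by simp [hj]
    rw [this]
    have := le_max_right (Lf c p r) (j + 1)
    omega

theorem alive_init (c : Nat → Nat) (p : Nat → Bool) (k : Nat) :
    Alive c p 0 0 k ↔ p k = true := by
  unfold Alive
  constructor
  · rintro (⟨j, hj, _⟩ | ⟨hp, _⟩)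
    · omega
    · exact hp
  · intro hp; exact Or.inr ⟨hp, by omega⟩

-- flag check: with all j < r already consumed by step t, the flag of cell r reads
-- "blocked": Alive ↔ t < Lf (r+1)
theorem alive_check (c : Nat → Nat) (p : Nat → Bool) {t r : Nat}
    (hLr : Lf c p r ≤ t) :
    Alive c p t r (c r) ↔ t < Lf c p (r + 1) := by
  by_cases hp : p (c r) = true
  · rw [Lf_preset c p hp]
    constructor
    · rintro h
      by_contra hge
      have htr : r + 1 ≤ t := by omega
      rcases h with ⟨j, hjr, hjc, halive⟩ | ⟨_, hnocc⟩
      · have hLfj : Lf c p (j + 1) = j + 1 := Lf_preset c p (hjc ▸ hp)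
        have := halive r (by omega) rfl
        omega
      · exact hnocc r (by omega) rfl
    · intro ht
      cases hl : lastOcc c r (c r) with
      | none =>
        refine Or.inr ⟨hp, fun i hit hic => ?_⟩
        rcases lastOcc_ge c (show i < r by omega) hic with ⟨j, hj, _⟩
        rw [hl] at hj; cases hj
      | some j =>
        obtain ⟨hjr, hjc⟩ := lastOcc_some c hl
        refine Or.inl ⟨j, hjr, hjc, fun i hit hic => ?_⟩
        rw [Lf_preset c p (hjc ▸ hp)]
        rcases lastOcc_ge c (show i < r by omega) hic with ⟨j', hj', hij'⟩
        rw [hl] at hj'; cases hj'; omega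
  · have hp' : p (c r) = false := by simpa using hp
    have hle : Lf c p (r + 1) ≤ r := Lf_nonpreset_le c p hp'
    constructor
    · rintro (⟨j, hjr, hjc, halive⟩ | ⟨hpt, _⟩)
      · by_contra hge
        have hLfjle : Lf c p (j + 1) ≤ j := Lf_nonpreset_le c p (hjc ▸ hp')
        rcases lastOcc_ge c hjr hjc with ⟨js, hjs, hjjs⟩
        obtain ⟨hjsr, hjsc⟩ := lastOcc_some c hjs
        have hLf : js + 1 ≤ Lf c p (r + 1) := by
          rw [show Lf c p (r + 1) = if p (c r) then r + 1 else
            max (Lf c p r) ((lastOcc c r (c r)).elim 0 (· + 1)) from rfl, if_neg hp, hjs]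
          exact le_trans (by simp) (le_max_right _ _)
        have hjt : j < t := by omega
        have := halive j hjt hjc
        omega
      · rw [hpt] at hp'; cases hp'
    · intro ht
      cases hl : lastOcc c r (c r) with
      | none =>
        exfalso
        have : Lf c p (r + 1) ≤ max (Lf c p r) 0 := by
          rw [show Lf c p (r + 1) = if p (c r) then r + 1 else
            max (Lf c p r) ((lastOcc c r (c r)).elim 0 (· + 1)) from rfl, if_neg hp, hl]
          simp
        simp at this; omega
      | some j =>
        obtain ⟨hjr, hjc⟩ := lastOcc_some c hl
        have hLfval : Lf c p (r + 1) = max (Lf c p r) (j + 1) := by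
          rw [show Lf c p (r + 1) = if p (c r) then r + 1 else
            max (Lf c p r) ((lastOcc c r (c r)).elim 0 (· + 1)) from rfl, if_neg hp, hl]
          simp
        have hjt : t ≤ j := by omega
        refine Or.inl ⟨j, hjr, hjc, fun i hit hic => ?_⟩
        exact occ_lt_Lf c p (hic.trans hjc.symm) (by omega)

-- consuming r at step t = Lf (r+1): cell r becomes alive, others unchanged
theorem alive_consume (c : Nat → Nat) (p : Nat → Bool) {t r : Nat}
    (hc : Lf c p (r + 1) = t) (k : Nat) :
    Alive c p t (r + 1) k ↔ (k = c r ∨ Alive c p t r k) := by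
  unfold Alive
  constructor
  · rintro (⟨j, hjr, hjc, halive⟩ | h)
    · rcases Nat.lt_succ_iff_lt_or_eq.mp hjr with hjr' | rfl
      · exact Or.inr (Or.inl ⟨j, hjr', hjc, halive⟩)
      · exact Or.inl hjc.symm
    · exact Or.inr (Or.inr h)
  · rintro (rfl | (⟨j, hjr, hjc, halive⟩ | h))
    · exact Or.inl ⟨r, by omega, rfl, fun i hit _ => by omega⟩
    · exact Or.inl ⟨j, by omega, hjc, halive⟩
    · exact Or.inr h

-- clearing cell (c t) at the end of step t
theorem alive_clear (c : Nat → Nat) (p : Nat → Bool) {t r : Nat}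
    (hr : ∀ j, j < r → Lf c p (j + 1) ≤ t) (k : Nat) :
    Alive c p (t + 1) r k ↔ (k ≠ c t ∧ Alive c p t r k) := by
  unfold Alive
  constructor
  · rintro (⟨j, hjr, hjc, halive⟩ | ⟨hp, hnocc⟩)
    · have hkct : k ≠ c t := by
        intro hkc
        have := halive t (by omega) (hkc ▸ rfl)
        have := hr j hjr
        omega
      refine ⟨hkct, Or.inl ⟨j, hjr, hjc, fun i hit hic => halive i (by omega) hic⟩⟩
    · have hkct : k ≠ c t := fun hkc => hnocc t (by omega) (hkc ▸ rfl)
      exact ⟨hkct, Or.inr ⟨hp, fun i hit => hnocc i (by omega)⟩⟩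
  · rintro ⟨hkct, ⟨j, hjr, hjc, halive⟩ | ⟨hp, hnocc⟩⟩
    · refine Or.inl ⟨j, hjr, hjc, fun i hit hic => ?_⟩
      rcases Nat.lt_succ_iff_lt_or_eq.mp hit with hit' | rfl
      · exact halive i hit' hic
      · exact absurd hic.symm hkct
    · refine Or.inr ⟨hp, fun i hit hic => ?_⟩
      rcases Nat.lt_succ_iff_lt_or_eq.mp hit with hit' | rfl
      · exact hnocc i hit' hic
      · exact hkct hic.symm

def cellOf (m : Nat) (v : Int) : Nat := (if v < 0 then v + m else v).toNat

theorem cellOf_lt {m : Nat} {v : Int} (h1 : -(m : Int) ≤ v) (h2 : v < (m : Int)) :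
    cellOf m v < m := by
  unfold cellOf; split_ifs <;> omega

theorem pyIdx_cell {m : Nat} {v : Int} (h1 : -(m : Int) ≤ v) (h2 : v < (m : Int)) :
    PySem.List.pyIdx? m v = some (cellOf m v) := by
  unfold PySem.List.pyIdx? cellOf
  split_ifs <;> simp_all <;> omega

theorem pyGetD_cell {α : Type} (ns : List α) {m : Nat} {v : Int} (hm : ns.length = m)
    (h1 : -(m : Int) ≤ v) (h2 : v < (m : Int)) (d : α) :
    PySem.List.pyGetD ns v d = ns.getD (cellOf m v) d := by
  subst hm
  unfold PySem.List.pyGetD PySem.List.pyGet?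
  rw [pyIdx_cell h1 h2]
  have := cellOf_lt h1 h2
  simp [List.getD, List.getElem?_eq_getElem this]

theorem pySetD_cell {α : Type} (ns : List α) {m : Nat} {v : Int} (hm : ns.length = m)
    (h1 : -(m : Int) ≤ v) (h2 : v < (m : Int)) (b : α) :
    PySem.List.pySetD ns v b = ns.set (cellOf m v) b := by
  subst hm
  unfold PySem.List.pySetD PySem.List.pySet?
  rw [pyIdx_cell h1 h2]
  rfl

theorem getD_set_self {α : Type} (ns : List α) {k : Nat} (hk : k < ns.length) (b d : α) :
    (ns.set k b).getD k d = b := by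
  simp [List.getD, hk]

theorem getD_set_ne {α : Type} (ns : List α) {k j : Nat} (h : j ≠ k) (b d : α) :
    (ns.set k b).getD j d = ns.getD j d := by
  simp [List.getD, List.getElem?_set_ne (by omega : k ≠ j)]

def cSeq (arr : List Int) (m : Nat) (i : Nat) : Nat := cellOf m (arr.getD i 0)
def pFn (nums : List Bool) (k : Nat) : Bool := nums.getD k false

theorem Tot_succ (c : Nat → Nat) (p : Nat → Bool) (r : Nat) :
    Tot c p (r + 1) = Tot c p r + ((r : Int) + 1 - (Lf c p (r + 1) : Int)) := by
  unfold Tot; rw [Finset.sum_range_succ]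

theorem innerA_spec (arr : List Int) (nums : List Bool) (n : Int) (n' : Nat)
    (hn : n = (n' : Int)) (_hlen : n' ≤ arr.length)
    (Hv : ∀ r, r < n' → -(nums.length : Int) ≤ arr.getD r 0 ∧ arr.getD r 0 < (nums.length : Int)) :
    ∀ (d t r : Nat) (ns : List Bool), d = n' - r → r ≤ n' →
    ns.length = nums.length →
    (∀ k, k < nums.length →
      (ns.getD k false = true ↔ Alive (cSeq arr nums.length) (pFn nums) t r k)) →
    (∀ j, j < r → Lf (cSeq arr nums.length) (pFn nums) (j + 1) ≤ t) →
    (r < n' → t ≤ Lf (cSeq arr nums.length) (pFn nums) (r + 1)) →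
    ∃ (R : Nat) (ns' : List Bool),
      solveInnerA n arr (t : Int) (r : Int) (Tot (cSeq arr nums.length) (pFn nums) r) ns
        = ((R : Int), Tot (cSeq arr nums.length) (pFn nums) R, ns') ∧
      r ≤ R ∧ R ≤ n' ∧ ns'.length = nums.length ∧
      (∀ k, k < nums.length →
        (ns'.getD k false = true ↔ Alive (cSeq arr nums.length) (pFn nums) t R k)) ∧
      (∀ j, j < R → Lf (cSeq arr nums.length) (pFn nums) (j + 1) ≤ t) ∧
      (R < n' → t < Lf (cSeq arr nums.length) (pFn nums) (R + 1)) := by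
  intro d
  induction d with
  | zero =>
    intro t r ns hd hr hlen' hflags ha hb
    have hrn : r = n' := by omega
    refine ⟨r, ns, ?_, le_rfl, by omega, hlen', hflags, ha, by omega⟩
    rw [solveInnerA]
    have : ¬ ((r : Int) < n) := by omega
    simp [this]
  | succ d ih =>
    intro t r ns hd hr hlen' hflags ha hb
    set c := cSeq arr nums.length with hc
    set p := pFn nums with hp
    have hrn : r < n' := by omega
    have hvr := Hv r hrn
    have hLr : Lf c p r ≤ t := by
      cases r with
      | zero => simp [Lf]
      | succ r' => exact ha r' (by omega)
    have hget : PySem.List.pyGetD ns (arr.getD r 0) false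
        = ns.getD (cSeq arr nums.length r) false :=
      pyGetD_cell ns hlen' hvr.1 hvr.2 false
    rw [solveInnerA]
    have hlt : ((r : Int) < n) := by omega
    simp only [dif_pos hlt, PySem.List.pyGetD_natCast]
    by_cases hflag : ns.getD (c r) false = true
    · rw [hget, ← hc, hflag]
      simp only [if_true]
      have halive : Alive c p t r (c r) :=
        (hflags (c r) (cellOf_lt hvr.1 hvr.2)).mp hflag
      have ht : t < Lf c p (r + 1) := (alive_check c p hLr).mp halive
      exact ⟨r, ns, rfl, le_rfl, by omega, hlen', hflags, ha, fun _ => ht⟩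
    · rw [hget, ← hc]
      simp only [hflag, Bool.false_eq_true, if_false]
      have hnal : ¬ Alive c p t r (c r) := fun h =>
        hflag ((hflags (c r) (cellOf_lt hvr.1 hvr.2)).mpr h)
      have hle : Lf c p (r + 1) ≤ t := by
        by_contra h
        exact hnal ((alive_check c p hLr).mpr (by omega))
      have heq : Lf c p (r + 1) = t := le_antisymm hle (hb hrn)
      have hset : PySem.List.pySetD ns (arr.getD r 0) true = ns.set (c r) true :=
        pySetD_cell ns hlen' hvr.1 hvr.2 true
      rw [hset]
      have htot : Tot c p r + (((r + 1 : Nat) : Int) - (t : Int)) = Tot c p (r + 1) := by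
        rw [Tot_succ, heq]; push_cast; ring
      have hflags' : ∀ k, k < nums.length →
          ((ns.set (c r) true).getD k false = true ↔ Alive c p t (r + 1) k) := by
        intro k hk
        rw [alive_consume c p heq k]
        by_cases hkc : k = c r
        · subst hkc
          rw [getD_set_self ns (by rw [hlen']; exact cellOf_lt hvr.1 hvr.2) true false]
          simp
        · rw [getD_set_ne ns hkc true false]
          rw [hflags k hk]
          simp [hkc]
      have ha' : ∀ j, j < r + 1 → Lf c p (j + 1) ≤ t := by
        intro j hj
        rcases Nat.lt_succ_iff_lt_or_eq.mp hj with h | rfl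
        · exact ha j h
        · omega
      have hb' : r + 1 < n' → t ≤ Lf c p (r + 1 + 1) := fun _ =>
        heq ▸ Lf_mono_succ c p (r + 1)
      rw [show ((r : Int) + 1) = ((r + 1 : Nat) : Int) by push_cast; ring]
      rw [show Tot c p r + ((↑(r + 1) : Int) - ↑t) = Tot c p (r + 1) from htot]
      rcases ih t (r + 1) (ns.set (c r) true) (by omega) (by omega)
        (by rw [List.length_set]; exact hlen') hflags' ha' hb' with
        ⟨R, ns', h1, h2, h3, h4, h5, h6, h7⟩
      exact ⟨R, ns', h1, by omega, h3, h4, h5, h6, h7⟩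

theorem outerA_spec (arr : List Int) (nums : List Bool) (n : Int) (n' : Nat)
    (hn : n = (n' : Int)) (hlen : n' ≤ arr.length)
    (Hv : ∀ r, r < n' → -(nums.length : Int) ≤ arr.getD r 0 ∧ arr.getD r 0 < (nums.length : Int)) :
    ∀ (d t r : Nat) (ns : List Bool), d = n' - t → t ≤ n' → r ≤ n' →
    ns.length = nums.length →
    (∀ k, k < nums.length →
      (ns.getD k false = true ↔ Alive (cSeq arr nums.length) (pFn nums) t r k)) →
    (∀ j, j < r → Lf (cSeq arr nums.length) (pFn nums) (j + 1) ≤ t) →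
    (r < n' → t ≤ Lf (cSeq arr nums.length) (pFn nums) (r + 1)) →
    solveOuterA n arr (t : Int) (r : Int) (Tot (cSeq arr nums.length) (pFn nums) r) ns
      = Tot (cSeq arr nums.length) (pFn nums) n' := by
  intro d
  induction d with
  | zero =>
    intro t r ns hd ht hr hlen' hflags ha hb
    have htn : t = n' := by omega
    rw [solveOuterA]
    have : ¬ ((t : Int) < n) := by omega
    simp only [dif_neg this]
    rcases Nat.lt_or_ge r n' with hrn | hrn
    · have h1 : (n' : Nat) ≤ Lf (cSeq arr nums.length) (pFn nums) (r + 1) := htn ▸ hb hrn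
      have h2 : Lf (cSeq arr nums.length) (pFn nums) (r + 1) ≤ r + 1 := Lf_le (cSeq arr nums.length) (pFn nums) (r + 1)
      have h3 : r + 1 = n' := by omega
      have h4 : Lf (cSeq arr nums.length) (pFn nums) (r + 1) = r + 1 := by omega
      rw [← h3, Tot_succ, h4]
      push_cast; ring
    · have : r = n' := by omega
      rw [this]
  | succ d ih =>
    intro t r ns hd ht hr hlen' hflags ha hb
    have htn : t < n' := by omega
    have hvt := Hv t htn
    rw [solveOuterA]
    have hlt : ((t : Int) < n) := by omega
    simp only [dif_pos hlt, PySem.List.pyGetD_natCast]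
    rcases innerA_spec arr nums n n' hn hlen Hv (n' - r) t r ns rfl hr hlen' hflags ha hb with
      ⟨R, ns', heq, hrR, hRn, hlen'', hflags', ha', hb'⟩
    rw [heq]
    simp only
    have hset : PySem.List.pySetD ns' (arr.getD t 0) false = ns'.set (cSeq arr nums.length t) false :=
      pySetD_cell ns' hlen'' hvt.1 hvt.2 false
    rw [hset]
    have hflags'' : ∀ k, k < nums.length →
        ((ns'.set (cSeq arr nums.length t) false).getD k false = true ↔ Alive (cSeq arr nums.length) (pFn nums) (t + 1) R k) := by
      intro k hk
      rw [alive_clear (cSeq arr nums.length) (pFn nums) ha' k]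
      by_cases hkc : k = cSeq arr nums.length t
      · subst hkc
        rw [getD_set_self ns' (by rw [hlen'']; exact cellOf_lt hvt.1 hvt.2) false false]
        simp
      · rw [getD_set_ne ns' hkc false false, hflags' k hk]
        simp [hkc]
    have ha'' : ∀ j, j < R → Lf (cSeq arr nums.length) (pFn nums) (j + 1) ≤ t + 1 := fun j hj => by
      have := ha' j hj; omega
    have hb'' : R < n' → t + 1 ≤ Lf (cSeq arr nums.length) (pFn nums) (R + 1) := fun h => hb' h
    have := ih (t + 1) R (ns'.set (cSeq arr nums.length t) false) (by omega) (by omega) hRn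
      (by rw [List.length_set]; exact hlen'') hflags'' ha'' hb''
    rw [show ((t : Int) + 1) = ((t + 1 : Nat) : Int) by push_cast; ring]
    exact this

theorem getD_mem_take {arr : List Int} {n' r : Nat} (hr : r < n') (hl : n' ≤ arr.length) :
    arr.getD r 0 ∈ arr.take n' := by
  have hrl : r < arr.length := by omega
  have h1 : arr.getD r 0 = arr[r] := by simp [List.getD, List.getElem?_eq_getElem hrl]
  have h2 : arr[r] = (arr.take n')[r]'(by simp; omega) := (List.getElem_take).symm
  rw [h1, h2]
  exact List.getElem_mem _

-- A computes Tot over the whole prefix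
theorem solveA_eq (n : Int) (arr : List Int) (nums : List Bool)
    (hn : 0 < n) (hlen : n ≤ (arr.length : Int))
    (hv : ∀ v ∈ arr.take n.toNat, -(nums.length : Int) ≤ v ∧ v < (nums.length : Int)) :
    solve n arr nums = Tot (cSeq arr nums.length) (pFn nums) n.toNat := by
  have hn' : n = ((n.toNat : Nat) : Int) := by omega
  have hlen' : n.toNat ≤ arr.length := by omega
  have Hv : ∀ r, r < n.toNat →
      -(nums.length : Int) ≤ arr.getD r 0 ∧ arr.getD r 0 < (nums.length : Int) :=
    fun r hr => hv _ (getD_mem_take hr hlen')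
  have hflags0 : ∀ k, k < nums.length →
      (nums.getD k false = true ↔ Alive (cSeq arr nums.length) (pFn nums) 0 0 k) := by
    intro k _
    rw [alive_init]
    exact Iff.rfl
  have := outerA_spec arr nums n n.toNat hn' hlen' Hv n.toNat 0 0 nums
    (by omega) (by omega) (by omega) rfl hflags0 (by omega) (by intro _; omega)
  unfold solve
  rw [show Tot (cSeq arr nums.length) (pFn nums) 0 = 0 by simp [Tot]] at this
  simpa using this

-- B-side invariant: the last-occurrence array holds, per cell, the latest index of
-- that cell among the first r positions (and -1 for never-seen or preset cells)
def lastSpec (c : Nat → Nat) (p : Nat → Bool) (r k : Nat) : Int :=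
  if p k then -1 else (lastOcc c r k).elim (-1) (fun j => (j : Int))

theorem foldB_spec (arr : List Int) (nums : List Bool) (n' : Nat)
    (Hv : ∀ r', r' < n' → -(nums.length : Int) ≤ arr.getD r' 0 ∧ arr.getD r' 0 < (nums.length : Int)) :
    ∀ r : Nat, r ≤ n' →
    ∃ L : List Int,
      (List.map (fun k => ((k : Nat) : Int)) (List.range r)).foldl (solveStepB arr nums)
          (List.replicate nums.length (-1 : Int), 0, 0)
        = (L, ((Lf (cSeq arr nums.length) (pFn nums) r : Nat) : Int),
            Tot (cSeq arr nums.length) (pFn nums) r) ∧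
      L.length = nums.length ∧
      ∀ k, k < nums.length →
        L.getD k (-1) = lastSpec (cSeq arr nums.length) (pFn nums) r k := by
  intro r
  induction r with
  | zero =>
    intro _
    refine ⟨List.replicate nums.length (-1 : Int), by simp [Lf, Tot], by simp, fun k hk => ?_⟩
    unfold lastSpec
    split_ifs with h <;> simp [lastOcc, List.getD, hk]
  | succ r ih =>
    intro hr
    rcases ih (by omega) with ⟨L, hfold, hLlen, hlast⟩
    have hvr := Hv r (by omega)
    have hm0 : 0 < nums.length := by
      rcases Nat.eq_zero_or_pos nums.length with h | h
      · exfalso; rw [h] at hvr; simp at hvr; omega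
      · exact h
    rw [List.range_succ, List.map_append, List.foldl_append, hfold]
    simp only [List.map_cons, List.map_nil, List.foldl_cons, List.foldl_nil]
    set c := cSeq arr nums.length with hc
    set p := pFn nums with hpdef
    have hcr : c r < nums.length := by rw [hc]; exact cellOf_lt hvr.1 hvr.2
    have hflagread : PySem.List.pyGetD nums (arr.getD r 0) false = p (c r) := by
      rw [pyGetD_cell nums rfl hvr.1 hvr.2 false]; rfl
    by_cases hpre : p (c r) = true
    · -- banned value: window start jumps past r, last-occurrence array untouched
      refine ⟨L, ?_, hLlen, ?_⟩
      · simp only [solveStepB, PySem.List.pyGetD_natCast, hflagread]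
        rw [if_pos hpre]
        have hLf : Lf c p (r + 1) = r + 1 := Lf_preset c p hpre
        rw [hLf, Tot_succ c p r, hLf]
        simp only [Prod.mk.injEq, true_and]
        exact ⟨by push_cast; ring, by push_cast; ring⟩
      · intro k hk
        rw [hlast k hk]
        unfold lastSpec
        split_ifs with h
        · rfl
        · rw [lastOcc_succ]
          have hne : ¬ (c r = k) := by
            intro hq; rw [hq] at hpre
            rw [hpre] at h; exact h rfl
          rw [if_neg hne]
    · have hpre' : p (c r) = false := by simpa using hpre
      have hLread : PySem.List.pyGetD L (arr.getD r 0) (-1)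
          = (lastOcc c r (c r)).elim (-1) (fun j => (j : Int)) := by
        rw [pyGetD_cell L hLlen hvr.1 hvr.2 (-1)]
        rw [show L.getD (cellOf nums.length (arr.getD r 0)) (-1) = L.getD (c r) (-1) from rfl]
        rw [hlast (c r) hcr]
        unfold lastSpec
        rw [if_neg (by simp [hpre'])]
      have hLwrite : PySem.List.pySetD L (arr.getD r 0) ((r : Nat) : Int)
          = L.set (c r) ((r : Nat) : Int) :=
        pySetD_cell L hLlen hvr.1 hvr.2 _
      refine ⟨L.set (c r) ((r : Nat) : Int), ?_, by rw [List.length_set]; exact hLlen, ?_⟩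
      · simp only [solveStepB, PySem.List.pyGetD_natCast, hflagread]
        rw [if_neg (by simp [hpre']), hLread, hLwrite]
        have hleft : (if (lastOcc c r (c r)).elim (-1) (fun j => (j : Int)) ≥ ((Lf c p r : Nat) : Int)
            then (lastOcc c r (c r)).elim (-1) (fun j => (j : Int)) + 1 else ((Lf c p r : Nat) : Int))
            = ((Lf c p (r + 1) : Nat) : Int) := by
          have hLfval : Lf c p (r + 1)
              = max (Lf c p r) ((lastOcc c r (c r)).elim 0 (· + 1)) := by
            rw [show Lf c p (r + 1) = if p (c r) then r + 1 else
              max (Lf c p r) ((lastOcc c r (c r)).elim 0 (· + 1)) from rfl, if_neg (by simp [hpre'])]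
          cases hlast' : lastOcc c r (c r) with
          | none =>
            rw [hlast'] at hLfval
            simp only [hlast', Option.elim_none] at *
            rw [if_neg (by omega)]
            omega
          | some j =>
            rw [hlast'] at hLfval
            simp only [hlast', Option.elim_some] at *
            rw [hLfval]
            split_ifs with h
            · push_cast; push_cast at h; omega
            · push_cast; push_cast at h; omega
        rw [hleft, Tot_succ c p r]
        simp only [Prod.mk.injEq, true_and]
        ring
      · intro k hk
        by_cases hkc : k = c r
        · subst hkc
          rw [getD_set_self L (by rw [hLlen]; exact hcr) _ (-1)]
          unfold lastSpec
          rw [if_neg (by simp [hpre']), lastOcc_succ, if_pos rfl]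
          simp
        · rw [getD_set_ne L hkc _ (-1), hlast k hk]
          unfold lastSpec
          split_ifs with h
          · rfl
          · rw [lastOcc_succ, if_neg (fun hq => hkc hq.symm)]

theorem solveB_eq (n : Int) (arr : List Int) (nums : List Bool)
    (hn : 0 < n) (hlen : n ≤ (arr.length : Int))
    (hv : ∀ v ∈ arr.take n.toNat, -(nums.length : Int) ≤ v ∧ v < (nums.length : Int)) :
    solve_alt n arr nums = Tot (cSeq arr nums.length) (pFn nums) n.toNat := by
  have hlen' : n.toNat ≤ arr.length := by omega
  have Hv : ∀ r, r < n.toNat →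
      -(nums.length : Int) ≤ arr.getD r 0 ∧ arr.getD r 0 < (nums.length : Int) :=
    fun r hr => hv _ (getD_mem_take hr hlen')
  rcases foldB_spec arr nums n.toNat Hv n.toNat le_rfl with ⟨L, hfold, _, _⟩
  unfold solve_alt
  rw [show n = ((n.toNat : Nat) : Int) by omega, PySem.List.pyRange_zero_natCast, hfold]
  show Tot (cSeq arr nums.length) (pFn nums) n.toNat = _
  congr 1

theorem solve_trivial (n : Int) (arr : List Int) (nums : List Bool) (hn : n ≤ 0) :
    solve n arr nums = 0 ∧ solve_alt n arr nums = 0 := by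
  constructor
  · unfold solve
    rw [solveOuterA]
    simp only [dif_neg (show ¬ ((0 : Int) < n) by omega)]
  · unfold solve_alt
    rw [show PySem.List.pyRange 0 n 1 = [] by
      unfold PySem.List.pyRange; norm_num; intro h'; omega]
    rfl

-- ===== VERDICT (by name: the statement is the Claim_ definition above) =====
theorem solve_spec : Claim_equal_solve := by
  intro n arr nums _ hpre
  unfold Spec_solve
  by_cases hn : n ≤ 0
  · rcases solve_trivial n arr nums hn with ⟨h1, h2⟩
    rw [h1, h2]
  · have hn' : 0 < n := by omega
    rcases hpre with hle | ⟨hlen, hv⟩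
    · omega
    · rw [solveA_eq n arr nums hn' hlen hv, solveB_eq n arr nums hn' hlen hv]
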